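-- pv_equiv track=rewrite | github.com/tsuru7/algorithm-study | AtCoder/ABC240/E.py | solve
-- ===== SOURCE A (Python) =====
-- def dfs(u, graph, visited, segments, nseg):
--     leaf = True
--     left_most = nseg+1
--     right_most = 0
--     for v in graph[u]:
--         if visited[v]:
--             continue
--         visited[v] = True
--         leaf = False
--         seg_, nseg = dfs(v, graph, visited, segments, nseg)
--         left, right = seg_
--         left_most = min(left_most, left)
--         right_most = max(right_most, right)
--     if leaf:
--         nseg += 1
--         segments[u] = [nseg, nseg]
--     else:
--         segments[u] = [left_most, right_most]
--
--     return segments[u], nseg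
--
-- def solve(n,graph):
--     visited = [False]*n
--     segments = [ [0, 0] for _ in range(n) ]
--     u = 0
--     visited[u] = True
--     dfs(u, graph, visited, segments, 0)
--
--     ans=[ segments[u] for u in range(n) ]
--     return ans
-- ===== SOURCE B (Python) =====
-- def solve(n, graph):
--     # Iterative DFS with an explicit stack; a node's segment is
--     # [entry_count + 1, count_at_pop]: no min/max accumulation, no recursion.
--     visited = [False] * n
--     seg = [[0, 0] for _ in range(n)]
--     entry = [0] * n
--     iters = [iter(adj) for adj in graph]
--     visited[0] = True
--     cnt = 0
--     stack = [0]
--     while stack: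
--         u = stack[-1]
--         child = None
--         for w in iters[u]:
--             if not visited[w]:
--                 child = w
--                 break
--         if child is None:
--             stack.pop()
--             if cnt == entry[u]:
--                 cnt += 1
--             seg[u] = [entry[u] + 1, cnt]
--         else:
--             visited[child] = True
--             entry[child] = cnt
--             stack.append(child)
--     return seg
-- ===== Notes on version B (the rewrite author's own statement) =====
-- stated objective: alternative
-- what changed: The recursive DFS with per-node min/max accumulation over child segments is replaced by an iterative explicit-stack DFS that keeps a running leaf counter and each node's entry count, emitting the segment [entry+1, count_at_pop] directly (leaf detected by counter equality), with no recursion and no min/max.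
-- outside the precondition, e.g. on solve(2, [[-1], []]): A returns [[1, 1], [1, 1]], B returns [[1, 1], [1, 1]]; on solve(1, [[-1], [-1, 3]]): A returns [[1, 1]], B returns [[1, 1]]
import Mathlib
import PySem

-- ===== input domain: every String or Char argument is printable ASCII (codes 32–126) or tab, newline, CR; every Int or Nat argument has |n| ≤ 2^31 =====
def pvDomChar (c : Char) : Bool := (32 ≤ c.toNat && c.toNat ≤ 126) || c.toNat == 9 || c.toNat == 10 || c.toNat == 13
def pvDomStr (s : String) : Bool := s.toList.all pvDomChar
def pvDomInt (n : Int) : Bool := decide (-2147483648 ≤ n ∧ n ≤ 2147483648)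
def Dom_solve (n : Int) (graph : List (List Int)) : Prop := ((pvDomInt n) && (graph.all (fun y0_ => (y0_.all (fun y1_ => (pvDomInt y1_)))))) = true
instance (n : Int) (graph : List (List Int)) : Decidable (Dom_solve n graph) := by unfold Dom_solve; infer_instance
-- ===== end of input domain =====

-- B is an iterative explicit-stack DFS (no recursion, no min/max accumulation): a node's
-- segment is [entry_count + 1, count_at_pop], which provably coincides with A's recursive
-- min/max leaf-interval computation (objective: alternative decomposition, same asymptotics).

-- ===== PORT A =====
-- dfs mutates visited/segments in place; the port threads them through the state.
-- Python's recursion is modelled with a fuel argument (none = fuel exhausted, never reached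
-- under Pre_: the recursion depth is bounded by the number of vertices).
mutual
def dfsA : Nat → Int → List (List Int) → List Bool → List (List Int) → Int →
    Option (List Bool × List (List Int) × List Int × Int)
  | 0, _, _, _, _, _ => none
  | Nat.succ f, u, graph, visited, segments, nseg =>
    match dfsALoop f (PySem.List.pyGetD graph u []) graph visited segments nseg true (nseg + 1) 0 with
    | none => none
    | some (visited, segments, nseg, leaf, lm, rm) =>
      if leaf then
        let nseg := nseg + 1
        let segments := PySem.List.pySetD segments u [nseg, nseg]
        some (visited, segments, PySem.List.pyGetD segments u [], nseg)
      else
        let segments := PySem.List.pySetD segments u [lm, rm]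
        some (visited, segments, PySem.List.pyGetD segments u [], nseg)
  termination_by f _ _ _ _ _ => (f, 0)

-- the 'for v in graph[u]' loop, threading (visited, segments, nseg, leaf, left_most, right_most)
def dfsALoop : Nat → List Int → List (List Int) → List Bool → List (List Int) → Int → Bool → Int → Int →
    Option (List Bool × List (List Int) × Int × Bool × Int × Int)
  | _, [], _, visited, segments, nseg, leaf, lm, rm => some (visited, segments, nseg, leaf, lm, rm)
  | f, v :: vs, graph, visited, segments, nseg, leaf, lm, rm =>
    if PySem.List.pyGetD visited v false then
      dfsALoop f vs graph visited segments nseg leaf lm rm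
    else
      match dfsA f v graph (PySem.List.pySetD visited v true) segments nseg with
      | none => none
      | some (visited, segments, seg_, nseg) =>
        match seg_ with
        | [left, right] =>
          dfsALoop f vs graph visited segments nseg false (min lm left) (max rm right)
        | _ => none   -- 'left, right = seg_' raises unless seg_ has exactly two items (never happens)
  termination_by f vs _ _ _ _ _ _ _ => (f, vs.length + 1)
end

def solve (n : Int) (graph : List (List Int)) : List (List Int) :=
  let visited := PySem.List.pyRepeat [false] n
  let segments := (PySem.List.pyRange 0 n).map (fun _ => ([0, 0] : List Int))
  let visited := PySem.List.pySetD visited 0 true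
  match dfsA (graph.length + 1) 0 graph visited segments 0 with
  | some (_, segments, _, _) => (PySem.List.pyRange 0 n).map (fun u => PySem.List.pyGetD segments u [])
  | none => (PySem.List.pyRange 0 n).map (fun u => PySem.List.pyGetD segments u [])

-- ===== PORT B =====
-- 'for w in iters[u]: if not visited[w]: child = w; break' — consumes the scanned prefix
def bScan (visited : List Bool) : List Int → Option Int × List Int
  | [] => (none, [])
  | w :: ws => if PySem.List.pyGetD visited w false then bScan visited ws else (some w, ws)

-- the 'while stack:' loop; fuel models the loop guard (none = fuel exhausted, never reached
-- under Pre_: the loop runs at most twice the number of vertices plus one times).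
def loopB : Nat → List (List Int) → List Bool → List (List Int) → List Int → Int → List Int →
    Option (List (List Int))
  | 0, _, _, _, _, _, _ => none
  | Nat.succ f, iters, visited, seg, entry, cnt, stack =>
    match stack.getLast? with
    | none => some seg
    | some u =>
      match bScan visited (PySem.List.pyGetD iters u []) with
      | (none, rest) =>
        let iters := PySem.List.pySetD iters u rest
        let stack := stack.dropLast
        let e := PySem.List.pyGetD entry u 0
        let cnt := if cnt = e then cnt + 1 else cnt
        let seg := PySem.List.pySetD seg u [e + 1, cnt]
        loopB f iters visited seg entry cnt stack
      | (some w, rest) =>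
        let iters := PySem.List.pySetD iters u rest
        let visited := PySem.List.pySetD visited w true
        let entry := PySem.List.pySetD entry w cnt
        loopB f iters visited seg entry cnt (stack ++ [w])

def solve_alt (n : Int) (graph : List (List Int)) : List (List Int) :=
  let visited := PySem.List.pyRepeat [false] n
  let seg := (PySem.List.pyRange 0 n).map (fun _ => ([0, 0] : List Int))
  let entry := PySem.List.pyRepeat [(0 : Int)] n
  let iters := graph
  let visited := PySem.List.pySetD visited 0 true
  match loopB (2 * graph.length + 2) iters visited seg entry 0 [0] with
  | some s => s
  | none => seg

-- ===== PRECONDITION & SPEC =====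
-- reachN m graph k v: vertex v is reachable from vertex 0 in at most k edge steps,
-- through intermediate vertices in [0, m)
def reachN (m : Int) (graph : List (List Int)) : Nat → Int → Bool
  | 0, v => v == 0
  | Nat.succ k, v =>
    reachN m graph k v ||
      (PySem.List.pyRange 0 m).any
        (fun u => reachN m graph k u && (PySem.List.pyGetD graph u []).contains v)

-- Pre_ asks that every vertex reachable from vertex 0 (the only part of the graph the
-- DFS ever touches) carries only labels in [0, min n len(graph)).  It excludes the inputs
-- on which A raises (n ≤ 0, an empty graph, a reachable out-of-range label) and, although
-- A returns there, reachable NEGATIVE labels: Python's negative-index wraparound there is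
-- an accident of A's list representation (B happens to behave identically on them).
def Pre_solve (n : Int) (graph : List (List Int)) : Prop :=
  0 < n ∧ 0 < graph.length ∧
    ∀ u ∈ PySem.List.pyRange 0 (min n (graph.length : Int)),
      reachN (min n (graph.length : Int)) graph graph.length u = true →
        ∀ v ∈ PySem.List.pyGetD graph u [], 0 ≤ v ∧ v < min n (graph.length : Int)
instance (n : Int) (graph : List (List Int)) : Decidable (Pre_solve n graph) := by
  unfold Pre_solve; infer_instance
def pvWitness_solve : Int × List (List Int) := (3, [[1, 2], [0], [0, 1]])
def Spec_solve (n : Int) (graph : List (List Int)) (out : List (List Int)) : Prop := out = solve_alt n graph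
instance (n : Int) (graph : List (List Int)) (out : List (List Int)) : Decidable (Spec_solve n graph out) := by unfold Spec_solve; infer_instance

-- ===== CLAIM (what is proved, stated in full; the proofs are below) =====
def Claim_equal_solve : Prop := ∀ (n : Int) (graph : List (List Int)), Dom_solve n graph → Pre_solve n graph → Spec_solve n graph (solve n graph)

-- ===== LEMMAS AND PROOFS =====

-- index/update micro-lemmas (nonnegative in-range indices)
theorem getD_setD_self {a : Type} (xs : List a) (i : Int) (v d : a)
    (h0 : 0 ≤ i) (h : i < (xs.length : Int)) :
    PySem.List.pyGetD (PySem.List.pySetD xs i v) i d = v := by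
  rw [PySem.List.pySetD_of_nonneg xs v h0,
    PySem.List.pyGetD_eq_getElem _ d h0 (by simpa using h)]
  rw [List.getElem_set_self]

theorem getD_setD_ne {a : Type} (xs : List a) (i j : Int) (v d : a)
    (h0 : 0 ≤ i) (h0' : 0 ≤ j) (hj : j < (xs.length : Int)) (hne : j ≠ i) :
    PySem.List.pyGetD (PySem.List.pySetD xs i v) j d = PySem.List.pyGetD xs j d := by
  rw [PySem.List.pySetD_of_nonneg xs v h0,
    PySem.List.pyGetD_eq_getElem _ d h0' (by simpa using hj),
    PySem.List.pyGetD_eq_getElem _ d h0' hj]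
  rw [List.getElem_set_ne]
  omega

theorem setD_setD {a : Type} (xs : List a) (i : Int) (u v : a) (h0 : 0 ≤ i) :
    PySem.List.pySetD (PySem.List.pySetD xs i u) i v = PySem.List.pySetD xs i v := by
  rw [PySem.List.pySetD_of_nonneg xs u h0, PySem.List.pySetD_of_nonneg _ v h0,
    PySem.List.pySetD_of_nonneg xs v h0, List.set_set]

def cF (l : List Bool) : Nat := l.count false

theorem cF_set_true : ∀ (l : List Bool) (i : Nat) (hi : i < l.length), l[i] = false →
    cF l = cF (l.set i true) + 1 := by
  intro l
  induction l with
  | nil => intro i h; simp at h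
  | cons x t ih =>
    intro i hi hx
    cases i with
    | zero => simp at hx; subst hx; simp [cF]
    | succ k =>
      simp at hx hi
      have := ih k hi hx
      cases x <;> simp [cF] at this ⊢ <;> omega

-- count of unvisited vertices among the first m positions: the induction measure
def cFT (m : Int) (l : List Bool) : Nat := cF (l.take m.toNat)

theorem cFT_set_true (m : Int) (l : List Bool) (v : Int) (h0 : 0 ≤ v) (hv : v < m)
    (hm : m ≤ (l.length : Int)) (hf : PySem.List.pyGetD l v false = false) :
    cFT m l = cFT m (PySem.List.pySetD l v true) + 1 := by
  have hvN : v.toNat < m.toNat := by omega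
  have hvL : v.toNat < l.length := by omega
  have hget : (l.take m.toNat)[v.toNat]'(by simp; omega) = false := by
    rw [List.getElem_take]
    rw [← PySem.List.pyGetD_eq_getElem l false h0 (by omega)]
    exact hf
  rw [PySem.List.pySetD_of_nonneg l true h0]
  unfold cFT
  rw [List.take_set]
  exact cF_set_true (l.take m.toNat) v.toNat (by simp; omega) hget

theorem reachN_mono (m : Int) (graph : List (List Int)) (v : Int) :
    ∀ k k' : Nat, k ≤ k' → reachN m graph k v = true → reachN m graph k' v = true := by
  intro k k' hle hr
  induction k' with
  | zero => have : k = 0 := by omega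
            rw [this] at hr; exact hr
  | succ k'' ih =>
    rcases Nat.lt_or_ge k (k'' + 1) with h | h
    · have := ih (by omega)
      simp [reachN, this]
    · have : k = k'' + 1 := by omega
      rw [this] at hr; exact hr

theorem reachN_step (m : Int) (graph : List (List Int)) (k : Nat) (u v : Int)
    (hu : reachN m graph k u = true) (h0 : 0 ≤ u) (hm : u < m)
    (hv : v ∈ PySem.List.pyGetD graph u []) :
    reachN m graph (k + 1) v = true := by
  simp only [reachN, Bool.or_eq_true, List.any_eq_true, Bool.and_eq_true]
  right
  exact ⟨u, PySem.List.mem_pyRange_one.mpr ⟨h0, hm⟩, hu, by simpa using hv⟩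

theorem getD_mono {l : List Bool} {v j : Int} (h0 : 0 ≤ v) (hv : v < (l.length : Int))
    (hj0 : 0 ≤ j) (hj : j < (l.length : Int))
    (h : PySem.List.pyGetD l j false = true) :
    PySem.List.pyGetD (PySem.List.pySetD l v true) j false = true := by
  by_cases hjv : j = v
  · subst hjv; exact getD_setD_self l j true false hj0 hj
  · rw [getD_setD_ne l v j true false h0 hj0 hj hjv]; exact h

-- one step of the while loop, by definitional unfolding
theorem loopB_succ (f : Nat) (iters : List (List Int)) (visited : List Bool)
    (seg : List (List Int)) (entry : List Int) (cnt : Int) (stack : List Int) :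
    loopB (f + 1) iters visited seg entry cnt stack =
      match stack.getLast? with
      | none => some seg
      | some u =>
        match bScan visited (PySem.List.pyGetD iters u []) with
        | (none, rest) =>
          loopB f (PySem.List.pySetD iters u rest) visited
            (PySem.List.pySetD seg u [PySem.List.pyGetD entry u 0 + 1,
              if cnt = PySem.List.pyGetD entry u 0 then cnt + 1 else cnt]) entry
            (if cnt = PySem.List.pyGetD entry u 0 then cnt + 1 else cnt) stack.dropLast
        | (some w, rest) =>
          loopB f (PySem.List.pySetD iters u rest) (PySem.List.pySetD visited w true) seg
            (PySem.List.pySetD entry w cnt) cnt (stack ++ [w]) := rfl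

-- the loop ignores already-visited elements at the head of the top node's iterator
theorem loopB_skip (F : Nat) (iters : List (List Int)) (visited : List Bool)
    (seg : List (List Int)) (entry : List Int) (cnt : Int) (S : List Int) (u v : Int)
    (vs : List Int) (h0 : 0 ≤ u) (hu : u < (iters.length : Int))
    (hiu : PySem.List.pyGetD iters u [] = v :: vs)
    (hv : PySem.List.pyGetD visited v false = true) :
    loopB F iters visited seg entry cnt (S ++ [u]) =
      loopB F (PySem.List.pySetD iters u vs) visited seg entry cnt (S ++ [u]) := by
  cases F with
  | zero => rfl
  | succ f =>
    rw [loopB_succ, loopB_succ]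
    simp only [List.getLast?_concat]
    have hgu : PySem.List.pyGetD (PySem.List.pySetD iters u vs) u [] = vs :=
      getD_setD_self iters u vs [] h0 hu
    rw [hiu, hgu]
    have hbs : bScan visited (v :: vs) = bScan visited vs := by
      simp [bScan, hv]
    rw [hbs]
    cases hres : bScan visited vs with
    | mk c rest =>
      cases c <;> simp only [] <;> rw [setD_setD iters u vs rest h0]


theorem loopB_step_push (f : Nat) (iters : List (List Int)) (visited : List Bool)
    (seg : List (List Int)) (entry : List Int) (cnt : Int) (S : List Int) (u w : Int)
    (rest : List Int)
    (hscan : bScan visited (PySem.List.pyGetD iters u []) = (some w, rest)) :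
    loopB (f + 1) iters visited seg entry cnt (S ++ [u]) =
      loopB f (PySem.List.pySetD iters u rest) (PySem.List.pySetD visited w true) seg
        (PySem.List.pySetD entry w cnt) cnt ((S ++ [u]) ++ [w]) := by
  rw [loopB_succ]
  simp only [List.getLast?_concat]
  rw [hscan]

theorem loopB_step_pop (f : Nat) (iters : List (List Int)) (visited : List Bool)
    (seg : List (List Int)) (entry : List Int) (cnt : Int) (S : List Int) (u : Int)
    (rest : List Int)
    (hscan : bScan visited (PySem.List.pyGetD iters u []) = (none, rest)) :
    loopB (f + 1) iters visited seg entry cnt (S ++ [u]) =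
      loopB f (PySem.List.pySetD iters u rest) visited
        (PySem.List.pySetD seg u [PySem.List.pyGetD entry u 0 + 1,
          if cnt = PySem.List.pyGetD entry u 0 then cnt + 1 else cnt]) entry
        (if cnt = PySem.List.pyGetD entry u 0 then cnt + 1 else cnt) S := by
  rw [loopB_succ]
  simp only [List.getLast?_concat]
  rw [hscan]
  simp only [List.dropLast_concat]

-- the simulation statement: one dfs call of A from a coherent joint state equals,
-- on B's side, running the stack loop until the top node u is popped
def SimP (c : Nat) : Prop :=
  ∀ (fA : Nat) (m : Int) (u : Int) (graph iters : List (List Int)) (visited : List Bool)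
    (seg : List (List Int)) (entry : List Int) (ns : Int) (k : Nat),
    cFT m visited = c → c < fA →
    m ≤ (graph.length : Int) → m ≤ (visited.length : Int) →
    visited.length = seg.length → visited.length = entry.length →
    iters.length = graph.length →
    (∀ w : Int, 0 ≤ w → w < m → reachN m graph graph.length w = true →
      ∀ v ∈ PySem.List.pyGetD graph w [], 0 ≤ v ∧ v < m) →
    reachN m graph k u = true → k + cFT m visited ≤ graph.length →
    0 ≤ u → u < m →
    PySem.List.pyGetD visited u false = true →
    PySem.List.pyGetD iters u [] = PySem.List.pyGetD graph u [] →
    (∀ j : Int, 0 ≤ j → j < m → PySem.List.pyGetD visited j false = false →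
      PySem.List.pyGetD iters j [] = PySem.List.pyGetD graph j []) →
    PySem.List.pyGetD entry u 0 = ns →
    0 ≤ ns →
    ∃ visited' seg' iters' entry' ns' md,
      dfsA fA u graph visited seg ns = some (visited', seg', [ns + 1, ns'], ns') ∧
      ns < ns' ∧
      cFT m visited = cFT m visited' + md ∧
      visited'.length = visited.length ∧ seg'.length = seg.length ∧
      iters'.length = iters.length ∧ entry'.length = entry.length ∧
      (∀ j : Int, 0 ≤ j → j < m →
        PySem.List.pyGetD visited j false = true → PySem.List.pyGetD visited' j false = true) ∧
      (∀ j : Int, 0 ≤ j → j < m → j ≠ u →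
        PySem.List.pyGetD visited j false = true →
        PySem.List.pyGetD iters' j [] = PySem.List.pyGetD iters j []) ∧
      (∀ j : Int, 0 ≤ j → j < m →
        PySem.List.pyGetD visited' j false = false →
        PySem.List.pyGetD iters' j [] = PySem.List.pyGetD graph j []) ∧
      (∀ j : Int, 0 ≤ j → j < m →
        PySem.List.pyGetD visited j false = true →
        PySem.List.pyGetD entry' j 0 = PySem.List.pyGetD entry j 0) ∧
      (∀ (fB : Nat) (S : List Int),
        loopB (fB + (2 * md + 1)) iters visited seg entry ns (S ++ [u]) =
          loopB fB iters' visited' seg' entry' ns' S)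

theorem simLoop (c : Nat) (IH : ∀ c', c' < c → SimP c') :
    ∀ (vs : List Int) (fA : Nat) (m : Int) (u : Int) (graph iters : List (List Int))
      (visited : List Bool) (seg : List (List Int)) (entry : List Int) (ns0 ns : Int) (k : Nat),
    cFT m visited ≤ c → c ≤ fA →
    m ≤ (graph.length : Int) → m ≤ (visited.length : Int) →
    visited.length = seg.length → visited.length = entry.length →
    iters.length = graph.length →
    (∀ w : Int, 0 ≤ w → w < m → reachN m graph graph.length w = true →
      ∀ v ∈ PySem.List.pyGetD graph w [], 0 ≤ v ∧ v < m) →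
    reachN m graph k u = true → k + cFT m visited ≤ graph.length →
    0 ≤ u → u < m →
    PySem.List.pyGetD visited u false = true →
    (∀ v ∈ vs, 0 ≤ v ∧ v < m) →
    (∀ v ∈ vs, v ∈ PySem.List.pyGetD graph u []) →
    PySem.List.pyGetD iters u [] = vs →
    (∀ j : Int, 0 ≤ j → j < m → PySem.List.pyGetD visited j false = false →
      PySem.List.pyGetD iters j [] = PySem.List.pyGetD graph j []) →
    PySem.List.pyGetD entry u 0 = ns0 →
    0 ≤ ns0 → ns0 ≤ ns →
    ∃ visited' seg' iters' entry' ns' md,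
      dfsALoop fA vs graph visited seg ns (decide (ns = ns0)) (ns0 + 1)
          (if ns = ns0 then 0 else ns) =
        some (visited', seg', ns', decide (ns' = ns0), ns0 + 1,
          if ns' = ns0 then 0 else ns') ∧
      ns ≤ ns' ∧
      cFT m visited = cFT m visited' + md ∧
      visited'.length = visited.length ∧ seg'.length = seg.length ∧
      iters'.length = iters.length ∧ entry'.length = entry.length ∧
      (∀ j : Int, 0 ≤ j → j < m →
        PySem.List.pyGetD visited j false = true → PySem.List.pyGetD visited' j false = true) ∧
      (∀ j : Int, 0 ≤ j → j < m → j ≠ u →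
        PySem.List.pyGetD visited j false = true →
        PySem.List.pyGetD iters' j [] = PySem.List.pyGetD iters j []) ∧
      (∀ j : Int, 0 ≤ j → j < m →
        PySem.List.pyGetD visited' j false = false →
        PySem.List.pyGetD iters' j [] = PySem.List.pyGetD graph j []) ∧
      (∀ j : Int, 0 ≤ j → j < m →
        PySem.List.pyGetD visited j false = true →
        PySem.List.pyGetD entry' j 0 = PySem.List.pyGetD entry j 0) ∧
      PySem.List.pyGetD iters' u [] = ([] : List Int) ∧
      (∀ (fB : Nat) (S : List Int),
        loopB (fB + 2 * md) iters visited seg entry ns (S ++ [u]) =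
          loopB fB iters' visited' seg' entry' ns' (S ++ [u])) := by
  intro vs
  induction vs with
  | nil =>
    intro fA m u graph iters visited seg entry ns0 ns k hc hcf hm1 hm2 hlv hle hli hval hku
      hbud hu0 huN hvu hbnd hsub hiu hinv hen hns0 hnle
    refine ⟨visited, seg, iters, entry, ns, 0, ?_, le_refl _, by omega, rfl, rfl, rfl, rfl,
      fun j _ _ h => h, fun j _ _ _ _ => rfl, hinv, fun j _ _ _ => rfl, hiu, ?_⟩
    · rw [dfsALoop]
    · intro fB S; norm_num
  | cons v vs ih =>
    intro fA m u graph iters visited seg entry ns0 ns k hc hcf hm1 hm2 hlv hle hli hval hku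
      hbud hu0 huN hvu hbnd hsub hiu hinv hen hns0 hnle
    obtain ⟨hv0, hvN⟩ := hbnd v (List.mem_cons_self)
    have huI : u < (iters.length : Int) := by omega
    have hvI : v < (iters.length : Int) := by omega
    have hvV : v < (visited.length : Int) := by omega
    have huV : u < (visited.length : Int) := by omega
    have hvE : v < (entry.length : Int) := by omega
    by_cases hv : PySem.List.pyGetD visited v false = true
    · -- v already visited: A skips it, B's scan will consume it
      have hih := ih fA m u graph (PySem.List.pySetD iters u vs) visited seg entry ns0 ns k
        hc hcf hm1 hm2 hlv hle (by rw [PySem.List.length_pySetD]; exact hli) hval hku hbud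
        hu0 huN hvu
        (fun w hw => hbnd w (List.mem_cons_of_mem v hw))
        (fun w hw => hsub w (List.mem_cons_of_mem v hw))
        (getD_setD_self iters u vs [] hu0 huI)
        (fun j hj0 hjN hjf => by
          have hju : j ≠ u := fun h => by rw [h, hvu] at hjf; cases hjf
          rw [getD_setD_ne iters u j vs [] hu0 hj0 (by omega) hju]
          exact hinv j hj0 hjN hjf)
        hen hns0 hnle
      obtain ⟨visited', seg', iters', entry', ns', md, heq, hnsle, hcount, hLv, hLs, hLi, hLe,
        hmono, hunt, hinv', hent, hiterU, hloop⟩ := hih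
      refine ⟨visited', seg', iters', entry', ns', md, ?_, hnsle, hcount, hLv, hLs,
        (by rw [hLi, PySem.List.length_pySetD]), hLe, hmono, ?_, hinv', hent, hiterU, ?_⟩
      · rw [dfsALoop, if_pos hv]; exact heq
      · intro j hj0 hjN hju hjt
        rw [hunt j hj0 hjN hju hjt]
        exact getD_setD_ne iters u j vs [] hu0 hj0 (by omega) hju
      · intro fB S
        rw [loopB_skip (fB + 2 * md) iters visited seg entry ns S u v vs hu0 huI hiu hv]
        exact hloop fB S
    · -- v unvisited: A recurses into it, B pushes it
      have hvf : PySem.List.pyGetD visited v false = false := by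
        cases h : PySem.List.pyGetD visited v false
        · rfl
        · exact absurd h hv
      have huv : v ≠ u := fun h => by rw [h, hvu] at hvf; cases hvf
      have hcount1 : cFT m visited = cFT m (PySem.List.pySetD visited v true) + 1 :=
        cFT_set_true m visited v hv0 hvN (by omega) hvf
      have hlt1 : cFT m (PySem.List.pySetD visited v true) < c := by omega
      have hv1T : PySem.List.pyGetD (PySem.List.pySetD visited v true) v false = true :=
        getD_setD_self visited v true false hv0 hvV
      have hu1T : PySem.List.pyGetD (PySem.List.pySetD visited v true) u false = true := by
        rw [getD_setD_ne visited v u true false hv0 hu0 huV (fun h => huv h.symm)]; exact hvu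
      have hSim := IH (cFT m (PySem.List.pySetD visited v true)) hlt1 fA m v graph
        (PySem.List.pySetD iters u vs) (PySem.List.pySetD visited v true) seg
        (PySem.List.pySetD entry v ns) ns (k + 1) rfl (by omega) hm1
        (by rw [PySem.List.length_pySetD]; exact hm2)
        (by rw [PySem.List.length_pySetD]; exact hlv)
        (by rw [PySem.List.length_pySetD, PySem.List.length_pySetD]; exact hle)
        (by rw [PySem.List.length_pySetD]; exact hli) hval
        (reachN_step m graph k u v hku hu0 huN (hsub v List.mem_cons_self)) (by omega)
        hv0 hvN hv1T
        (by
          rw [getD_setD_ne iters u v vs [] hu0 hv0 hvI huv]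
          exact hinv v hv0 hvN hvf)
        (fun j hj0 hjN hjf => by
          have hjv : j ≠ v := fun h => by rw [h, hv1T] at hjf; cases hjf
          have hjold : PySem.List.pyGetD visited j false = false := by
            rw [getD_setD_ne visited v j true false hv0 hj0 (by omega) hjv] at hjf
            exact hjf
          have hju : j ≠ u := fun h => by rw [h, hvu] at hjold; cases hjold
          rw [getD_setD_ne iters u j vs [] hu0 hj0 (by omega) hju]
          exact hinv j hj0 hjN hjold)
        (getD_setD_self entry v ns 0 hv0 hvE) (by omega)
      obtain ⟨visited2, seg2, iters2, entry2, ns2, mv, hdfs2, hlt2, hcnt2, hLv2, hLs2, hLi2,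
        hLe2, hmono2, hunt2, hinv2, hent2, hloop2⟩ := hSim
      have hLv2' : visited2.length = visited.length := by
        rw [hLv2, PySem.List.length_pySetD]
      have hLi2' : iters2.length = iters.length := by
        rw [hLi2, PySem.List.length_pySetD]
      have hLe2' : entry2.length = entry.length := by
        rw [hLe2, PySem.List.length_pySetD]
      have hcF2 : cFT m visited2 ≤ c := by omega
      have hu2T : PySem.List.pyGetD visited2 u false = true := hmono2 u hu0 huN hu1T
      have hit2u : PySem.List.pyGetD iters2 u [] = vs := by
        rw [hunt2 u hu0 huN (fun h => huv h.symm) hu1T]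
        exact getD_setD_self iters u vs [] hu0 huI
      have hent2u : PySem.List.pyGetD entry2 u 0 = ns0 := by
        rw [hent2 u hu0 huN hu1T, getD_setD_ne entry v u ns 0 hv0 hu0 (by omega)
          (fun h => huv h.symm)]
        exact hen
      have hih := ih fA m u graph iters2 visited2 seg2 entry2 ns0 ns2 k hcF2 hcf hm1
        (by omega) (by omega) (by omega) (by omega) hval hku (by omega)
        hu0 huN hu2T (fun w hw => hbnd w (List.mem_cons_of_mem v hw))
        (fun w hw => hsub w (List.mem_cons_of_mem v hw)) hit2u hinv2 hent2u
        hns0 (by omega)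
      obtain ⟨visited', seg', iters', entry', ns', mr, hdfs', hle', hcnt', hLv', hLs', hLi',
        hLe', hmono', hunt', hinv', hent', hiterU', hloop'⟩ := hih
      have hdec2 : decide (ns2 = ns0) = false := by simp; omega
      have hif2 : (if ns2 = ns0 then (0 : Int) else ns2) = ns2 := if_neg (by omega)
      refine ⟨visited', seg', iters', entry', ns', mv + mr + 1, ?_, by omega, by omega,
        by omega, by omega, by omega, by omega, ?_, ?_, hinv', ?_, hiterU', ?_⟩
      · -- A-side equation
        rw [dfsALoop]
        rw [if_neg (by rw [hvf]; simp), hdfs2]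
        have hmin : min (ns0 + 1) (ns + 1) = ns0 + 1 := min_eq_left (by omega)
        have hmax : max (if ns = ns0 then 0 else ns) ns2 = ns2 := by
          split_ifs <;> [exact max_eq_right (by omega); exact max_eq_right (by omega)]
        simp only [hmin, hmax]
        rw [hdec2, hif2] at hdfs'
        exact hdfs'
      · -- visited monotone
        intro j hj0 hjN hjt
        exact hmono' j hj0 hjN (hmono2 j hj0 hjN (getD_mono hv0 hvV hj0 (by omega) hjt))
      · -- iterators of other already-visited nodes untouched
        intro j hj0 hjN hju hjt
        have hjv : j ≠ v := fun h => by rw [h, hvf] at hjt; cases hjt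
        have hjt1 : PySem.List.pyGetD (PySem.List.pySetD visited v true) j false = true :=
          getD_mono hv0 hvV hj0 (by omega) hjt
        rw [hunt' j hj0 hjN hju (hmono2 j hj0 hjN hjt1), hunt2 j hj0 hjN hjv hjt1]
        exact getD_setD_ne iters u j vs [] hu0 hj0 (by omega) hju
      · -- entries of already-visited nodes untouched
        intro j hj0 hjN hjt
        have hjv : j ≠ v := fun h => by rw [h, hvf] at hjt; cases hjt
        have hjt1 : PySem.List.pyGetD (PySem.List.pySetD visited v true) j false = true :=
          getD_mono hv0 hvV hj0 (by omega) hjt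
        rw [hent' j hj0 hjN (hmono2 j hj0 hjN hjt1), hent2 j hj0 hjN hjt1]
        exact getD_setD_ne entry v j ns 0 hv0 hj0 (by omega) hjv
      · -- B-side: one push step, the whole subtree of v, then the rest of the scan
        intro fB S
        have harith : fB + 2 * (mv + mr + 1) = ((fB + 2 * mr) + (2 * mv + 1)) + 1 := by omega
        have hscan : bScan visited (PySem.List.pyGetD iters u []) = (some v, vs) := by
          rw [hiu]; simp [bScan, hvf]
        rw [harith, loopB_step_push _ iters visited seg entry ns S u v vs hscan,
          hloop2 (fB + 2 * mr) (S ++ [u])]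
        exact hloop' fB S

theorem simP_all : ∀ c, SimP c := by
  intro c
  induction c using Nat.strong_induction_on with
  | _ c IH =>
    intro fA m u graph iters visited seg entry ns k hc hfa hm1 hm2 hlv hle hli hval hku hbud
      hu0 huN hvu hiu hinv hen hns
    cases fA with
    | zero => omega
    | succ f =>
      have hkL : k ≤ graph.length := by omega
      have hbu : ∀ w ∈ PySem.List.pyGetD graph u [], 0 ≤ w ∧ w < m :=
        hval u hu0 huN (reachN_mono m graph u k graph.length hkL hku)
      have hLoop := simLoop c IH (PySem.List.pyGetD graph u []) f m u graph iters visited seg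
        entry ns ns k (by omega) (by omega) hm1 hm2 hlv hle hli hval hku hbud hu0 huN hvu
        hbu (fun v h => h) hiu hinv hen hns (le_refl ns)
      obtain ⟨visited', seg', iters', entry', ns', md, heq, hnsle, hcount, hLv, hLs, hLi, hLe,
        hmono, hunt, hinv', hent, hiterU, hloop⟩ := hLoop
      have e1 : decide (ns = ns) = true := by simp
      have e2 : (if ns = ns then (0 : Int) else ns) = 0 := by simp
      rw [e1, e2] at heq
      have huS : u < (seg'.length : Int) := by omega
      have hentu' : PySem.List.pyGetD entry' u 0 = ns := by rw [hent u hu0 huN hvu]; exact hen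
      have huT' : PySem.List.pyGetD visited' u false = true := hmono u hu0 huN hvu
      have hscan : bScan visited' (PySem.List.pyGetD iters' u []) = (none, []) := by
        rw [hiterU]; rfl
      by_cases hL : ns' = ns
      · -- u turned out to be a leaf (no new leaf was produced while scanning its children)
        subst hL
        rw [e1, e2] at heq
        refine ⟨visited', PySem.List.pySetD seg' u [ns' + 1, ns' + 1],
          PySem.List.pySetD iters' u [], entry', ns' + 1, md, ?_, by omega, hcount,
          hLv, ?_, ?_, hLe, hmono, ?_, ?_, hent, ?_⟩
        · rw [dfsA, heq]
          simp only [if_true]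
          rw [getD_setD_self seg' u [ns' + 1, ns' + 1] [] hu0 huS]
        · rw [PySem.List.length_pySetD]; exact hLs
        · rw [PySem.List.length_pySetD]; exact hLi
        · intro j hj0 hjN hju hjt
          rw [getD_setD_ne iters' u j [] [] hu0 hj0 (by omega) hju]
          exact hunt j hj0 hjN hju hjt
        · intro j hj0 hjN hjf
          have hju : j ≠ u := fun h => by rw [h, huT'] at hjf; cases hjf
          rw [getD_setD_ne iters' u j [] [] hu0 hj0 (by omega) hju]
          exact hinv' j hj0 hjN hjf
        · intro fB S
          have h1 : fB + (2 * md + 1) = (fB + 1) + 2 * md := by omega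
          rw [h1, hloop (fB + 1) S,
            loopB_step_pop fB iters' visited' seg' entry' ns' S u [] hscan, hentu']
          simp
      · -- u is internal: its segment is [first leaf of its subtree, last leaf of its subtree]
        have d1 : decide (ns' = ns) = false := by simp [hL]
        have d2 : (if ns' = ns then (0 : Int) else ns') = ns' := if_neg hL
        rw [d1, d2] at heq
        refine ⟨visited', PySem.List.pySetD seg' u [ns + 1, ns'],
          PySem.List.pySetD iters' u [], entry', ns', md, ?_, by omega, hcount,
          hLv, ?_, ?_, hLe, hmono, ?_, ?_, hent, ?_⟩
        · rw [dfsA, heq]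
          simp only [Bool.false_eq_true, if_false]
          rw [getD_setD_self seg' u [ns + 1, ns'] [] hu0 huS]
        · rw [PySem.List.length_pySetD]; exact hLs
        · rw [PySem.List.length_pySetD]; exact hLi
        · intro j hj0 hjN hju hjt
          rw [getD_setD_ne iters' u j [] [] hu0 hj0 (by omega) hju]
          exact hunt j hj0 hjN hju hjt
        · intro j hj0 hjN hjf
          have hju : j ≠ u := fun h => by rw [h, huT'] at hjf; cases hjf
          rw [getD_setD_ne iters' u j [] [] hu0 hj0 (by omega) hju]
          exact hinv' j hj0 hjN hjf
        · intro fB S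
          have h1 : fB + (2 * md + 1) = (fB + 1) + 2 * md := by omega
          rw [h1, hloop (fB + 1) S,
            loopB_step_pop fB iters' visited' seg' entry' ns' S u [] hscan, hentu']
          rw [if_neg hL]

-- ===== VERDICT (by name: the statement is the Claim_ definition above) =====
theorem solve_spec : Claim_equal_solve := by
  unfold Claim_equal_solve
  intro n graph _ hPre
  obtain ⟨hn, hgl, hval⟩ := hPre
  unfold Spec_solve solve solve_alt
  simp only [PySem.List.pyRepeat_singleton]
  have hm1 : min n (graph.length : Int) ≤ (graph.length : Int) := min_le_right _ _
  have hmn : min n (graph.length : Int) ≤ n := min_le_left _ _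
  have hm0 : 0 < min n (graph.length : Int) := lt_min hn (by exact_mod_cast hgl)
  have hV0 : (List.replicate n.toNat false).length = n.toNat := List.length_replicate
  have hlv1 : (PySem.List.pySetD (List.replicate n.toNat false) 0 true).length = n.toNat := by
    rw [PySem.List.length_pySetD]; exact hV0
  have hlseg : ((PySem.List.pyRange 0 n).map (fun _ => ([0, 0] : List Int))).length
      = n.toNat := by
    rw [List.length_map, PySem.List.length_pyRange_one]; omega
  have hle0 : (List.replicate n.toNat (0 : Int)).length = n.toNat := List.length_replicate
  have hvu : PySem.List.pyGetD (PySem.List.pySetD (List.replicate n.toNat false) 0 true) 0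
      false = true :=
    getD_setD_self _ 0 true false (by norm_num) (by rw [hV0]; omega)
  have hcF : cFT (min n (graph.length : Int))
      (PySem.List.pySetD (List.replicate n.toNat false) 0 true) + 1
      = (min n (graph.length : Int)).toNat := by
    have h := cFT_set_true (min n (graph.length : Int)) (List.replicate n.toNat false) 0
      (by norm_num) hm0 (by rw [hV0]; omega)
      (by
        rw [PySem.List.pyGetD_eq_getElem _ false (by norm_num) (by rw [hV0]; omega)]
        simp)
    rw [← h]
    unfold cFT cF
    rw [List.take_replicate]
    simp only [List.count_replicate]
    have : min (min n (graph.length : Int)).toNat n.toNat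
        = (min n (graph.length : Int)).toNat := by omega
    rw [this]
    simp
  have hen : PySem.List.pyGetD (List.replicate n.toNat (0 : Int)) 0 0 = 0 := by
    rw [PySem.List.pyGetD_eq_getElem _ 0 (by norm_num) (by rw [hle0]; omega)]
    simp
  have hr0 : reachN (min n (graph.length : Int)) graph 0 0 = true := by simp [reachN]
  have hval' : ∀ w : Int, 0 ≤ w → w < min n (graph.length : Int) →
      reachN (min n (graph.length : Int)) graph graph.length w = true →
      ∀ v ∈ PySem.List.pyGetD graph w [], 0 ≤ v ∧ v < min n (graph.length : Int) := by
    intro w h0 hw hr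
    exact hval w (PySem.List.mem_pyRange_one.mpr ⟨h0, hw⟩) hr
  have hSim := simP_all (cFT (min n (graph.length : Int))
      (PySem.List.pySetD (List.replicate n.toNat false) 0 true))
    (graph.length + 1) (min n (graph.length : Int)) 0 graph graph
    (PySem.List.pySetD (List.replicate n.toNat false) 0 true)
    ((PySem.List.pyRange 0 n).map (fun _ => ([0, 0] : List Int)))
    (List.replicate n.toNat (0 : Int)) 0 0 rfl (by omega) hm1 (by omega)
    (by omega) (by omega) rfl hval' hr0 (by omega) (by norm_num) hm0 hvu rfl
    (fun j _ _ _ => rfl) hen (le_refl 0)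
  obtain ⟨visited', seg', iters', entry', ns', md, heq, hns', hcount, hLv, hLs, hLi, hLe,
    _, _, _, _, hloop⟩ := hSim
  rw [heq]
  have hmd : md + 1 ≤ graph.length := by omega
  have harith : 2 * graph.length + 2 = (2 * graph.length - 2 * md) + 1 + (2 * md + 1) := by
    omega
  have hl := hloop (2 * graph.length - 2 * md + 1) []
  simp only [List.nil_append] at hl
  rw [harith, hl, loopB_succ]
  simp only [List.getLast?_nil]
  have hn' : n = (seg'.length : Int) := by rw [hLs, hlseg]; omega
  rw [hn', PySem.List.map_pyGetD_pyRange_zero']
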